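-- pv_equiv track=rewrite | github.com/robtapia/T1-Discretas | respaldo.py | SetLiteral
-- ===== SOURCE A (Python) =====
-- def SetLiteral(formula, lit):
--     if(formula==[]):
--         return formula
--     clausula=0
--     while(clausula<len(formula)):
--         if lit in formula[clausula]:
--             del formula[clausula]
--         elif -lit in formula[clausula]:
--             formula[clausula].remove(-lit)
--         else:
--             clausula=clausula+1
--     return formula
-- ===== SOURCE B (Python) =====
-- def SetLiteral(formula, lit):
--     # Two-pass, non-scanning rewrite: filter satisfied clauses, then strip -lit.
--     # Mutates `formula` in place (like A) and returns it.
--     survivors = [c for c in formula if lit not in c]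
--     for c in survivors:
--         c[:] = [x for x in c if x != -lit]
--     formula[:] = survivors
--     return formula
-- ===== Notes on version B (the rewrite author's own statement) =====
-- stated objective: simpler
-- what changed: Replaces the index-juggling while loop that deletes and removes in place (re-examining the same index after every mutation) with two plain passes: a list-comprehension filter dropping clauses containing lit, then a per-clause filter stripping all occurrences of -lit.
import Mathlib
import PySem

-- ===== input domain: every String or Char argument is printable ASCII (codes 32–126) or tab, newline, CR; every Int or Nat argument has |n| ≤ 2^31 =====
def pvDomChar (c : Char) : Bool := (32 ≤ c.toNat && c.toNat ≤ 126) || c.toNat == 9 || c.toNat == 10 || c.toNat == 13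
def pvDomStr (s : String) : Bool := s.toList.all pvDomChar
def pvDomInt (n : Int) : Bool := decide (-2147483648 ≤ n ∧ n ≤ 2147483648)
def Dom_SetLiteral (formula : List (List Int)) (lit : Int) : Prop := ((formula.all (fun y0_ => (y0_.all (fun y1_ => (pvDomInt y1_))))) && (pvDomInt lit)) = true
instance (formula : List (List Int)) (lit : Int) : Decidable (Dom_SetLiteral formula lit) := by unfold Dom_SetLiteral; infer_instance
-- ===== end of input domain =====

-- B changes A's in-place while loop into two linear filter passes; equivalence is about
-- the returned value (both Pythons mutate `formula` in place to that same value).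

-- ===== PORT A =====
-- `c.remove(x)`: removes the first occurrence of x (only called when x ∈ c, as in A).
def pyRemoveFirst (c : List Int) (x : Int) : List Int :=
  match c with
  | [] => []
  | y :: ys => if y = x then ys else y :: pyRemoveFirst ys x

theorem pyRemoveFirst_length_lt (c : List Int) (x : Int) :
    x ∈ c → (pyRemoveFirst c x).length < c.length := by
  induction c with
  | nil => intro h; cases h
  | cons y ys ih =>
    intro h
    simp only [pyRemoveFirst]
    by_cases hy : y = x
    · simp [hy]
    · have hx : x ∈ ys := by
        rcases List.mem_cons.1 h with h1 | h1
        · exact absurd h1.symm hy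
        · exact h1
      simpa [hy] using Nat.succ_lt_succ (ih hx)

-- the while loop of A: state = (formula, clausula)
def SetLiteralLoop (lit : Int) (formula : List (List Int)) (clausula : Nat) :
    List (List Int) :=
  if h : clausula < formula.length then
    let c := formula[clausula]
    if lit ∈ c then
      SetLiteralLoop lit (formula.eraseIdx clausula) clausula
    else if -lit ∈ c then
      SetLiteralLoop lit (formula.set clausula (pyRemoveFirst c (-lit))) clausula
    else
      SetLiteralLoop lit formula (clausula + 1)
  else
    formula
termination_by (formula.length - clausula, (formula.getD clausula []).length)
decreasing_by
  · left
    have : (formula.eraseIdx clausula).length = formula.length - 1 :=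
      List.length_eraseIdx_of_lt h
    omega
  · refine Prod.Lex.right' _ (by simp) ?_
    simp only [List.getD, List.getElem?_set_self (by omega),
      List.getElem?_eq_getElem h, Option.getD_some]
    exact pyRemoveFirst_length_lt _ _ (by assumption)
  · left; omega

def SetLiteral (formula : List (List Int)) (lit : Int) : List (List Int) :=
  if formula = [] then formula
  else SetLiteralLoop lit formula 0

-- ===== PORT B =====
def SetLiteral_alt (formula : List (List Int)) (lit : Int) : List (List Int) :=
  let survivors := formula.filter (fun c => ¬ (lit ∈ c))
  survivors.map (fun c => c.filter (fun x => x ≠ -lit))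

-- ===== PRECONDITION & SPEC =====
def Spec_SetLiteral (formula : List (List Int)) (lit : Int) (out : List (List Int)) : Prop := out = SetLiteral_alt formula lit
instance (formula : List (List Int)) (lit : Int) (out : List (List Int)) : Decidable (Spec_SetLiteral formula lit out) := by unfold Spec_SetLiteral; infer_instance

-- ===== CLAIM (what is proved, stated in full; the proofs are below) =====
def Claim_equal_SetLiteral : Prop := ∀ (formula : List (List Int)) (lit : Int), Dom_SetLiteral formula lit → Spec_SetLiteral formula lit (SetLiteral formula lit)

-- ===== LEMMAS AND PROOFS =====

theorem mem_of_mem_pyRemoveFirst {c : List Int} {x y : Int}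
    (h : y ∈ pyRemoveFirst c x) : y ∈ c := by
  induction c with
  | nil => simpa [pyRemoveFirst] using h
  | cons z zs ih =>
    simp only [pyRemoveFirst] at h
    by_cases hz : z = x
    · simp [hz] at h; simp [h]
    · simp [hz] at h
      rcases h with h | h
      · simp [h]
      · simp [ih h]

theorem filter_pyRemoveFirst (c : List Int) (x : Int) :
    (pyRemoveFirst c x).filter (fun y => !decide (y = x)) =
      c.filter (fun y => !decide (y = x)) := by
  induction c with
  | nil => simp [pyRemoveFirst]
  | cons z zs ih =>
    simp only [pyRemoveFirst]
    by_cases hz : z = x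
    · simp [hz, List.filter]
    · simp [hz, List.filter, ih]

theorem loop_eq_alt (lit : Int) (formula : List (List Int)) (clausula : Nat) :
    SetLiteralLoop lit formula clausula =
      formula.take clausula ++ SetLiteral_alt (formula.drop clausula) lit := by
  fun_induction SetLiteralLoop lit formula clausula with
  | case1 formula clausula h c hlit ih =>
    -- delete the clause containing lit
    rw [ih]
    have hdrop : formula.drop clausula = c :: formula.drop (clausula + 1) :=
      List.drop_eq_getElem_cons h
    have hlen : (formula.take clausula).length = clausula :=
      List.length_take_of_le (Nat.le_of_lt h)
    have he : formula.eraseIdx clausula =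
        formula.take clausula ++ formula.drop (clausula + 1) :=
      List.eraseIdx_eq_take_drop_succ ..
    rw [he, List.take_left' hlen, List.drop_left' hlen, hdrop]
    simp [SetLiteral_alt, List.filter, hlit]
  | case2 formula clausula h c hlit hneg ih =>
    -- remove one occurrence of -lit, re-examine same index
    rw [ih]
    have hdrop : formula.drop clausula = c :: formula.drop (clausula + 1) :=
      List.drop_eq_getElem_cons h
    have hdrop' : (formula.set clausula (pyRemoveFirst c (-lit))).drop clausula =
        pyRemoveFirst c (-lit) :: formula.drop (clausula + 1) := by
      rw [List.drop_set, if_neg (Nat.lt_irrefl _), Nat.sub_self, hdrop,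
        List.set_cons_zero]
    rw [List.take_set_of_le (Nat.le_refl _), hdrop', hdrop]
    have hlit' : lit ∉ pyRemoveFirst c (-lit) :=
      fun hm => hlit (mem_of_mem_pyRemoveFirst hm)
    simp only [SetLiteral_alt, List.filter, hlit, hlit', decide_true, decide_false,
      decide_not, Bool.not_false, List.map]
    rw [filter_pyRemoveFirst]
  | case3 formula clausula h c hlit hneg ih =>
    -- clause untouched: advance
    rw [ih]
    have hdrop : formula.drop clausula = c :: formula.drop (clausula + 1) :=
      List.drop_eq_getElem_cons h
    have htake : formula.take (clausula + 1) = formula.take clausula ++ [c] :=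
      List.take_succ_eq_append_getElem h
    have hc : c.filter (fun x => !decide (x = -lit)) = c := by
      apply List.filter_eq_self.2
      intro a ha
      simp only [Bool.not_eq_true', decide_eq_false_iff_not]
      intro hax; exact hneg (hax ▸ ha)
    rw [htake, hdrop]
    simp [SetLiteral_alt, List.filter, hlit, hc]
  | case4 formula clausula h =>
    have : formula.length ≤ clausula := Nat.le_of_not_lt h
    simp [List.take_of_length_le this, List.drop_of_length_le this, SetLiteral_alt]

-- ===== VERDICT (by name: the statement is the Claim_ definition above) =====
theorem SetLiteral_spec : Claim_equal_SetLiteral := by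
  intro formula lit _
  unfold Spec_SetLiteral SetLiteral
  by_cases hf : formula = []
  · simp [hf, SetLiteral_alt]
  · rw [if_neg hf, loop_eq_alt]; simp
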